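-- pv_equiv track=rewrite | github.com/TRON-Bioinformatics/vcf2neofox | icam_scripts/nucleotide_to_peptide_functions.py | find_peptides
-- ===== SOURCE A (Python) =====
-- def find_peptides(prot_seq,unmutated_prot,ws,peptide=""):
--   s = prot_seq
--   y = ""
--   return_l = []
--   for i in range(0,(len(s)-ws+1),1):
--     window = s[i:i+ws]
--     if (window not in peptide) and peptide != "":
--       continue # skip all windows which are not in "peptide" aka the 27mer
--     x = unmutated_prot.find(window)
--     if x == -1:
--       if y == "":
--         y = window
--         start = i
--       else:
--         y = y + window[-1]
--     else:
--       if y != "":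
--         return_l.append([y,start])
--         y = ""
--   if y != "":
--     return_l.append([y,start])
--   return return_l
-- ===== SOURCE B (Python) =====
-- def find_peptides(prot_seq, unmutated_prot, ws, peptide=""):
--     # Pass 1: label every kept window (those in `peptide`, or all if peptide == "")
--     # with whether it is absent from the unmutated protein.
--     labels = [(i, prot_seq[i:i+ws])
--               for i in range(0, len(prot_seq) - ws + 1)
--               if peptide == "" or prot_seq[i:i+ws] in peptide]
--     labels = [(i, w, unmutated_prot.find(w) == -1) for (i, w) in labels]
--     # Pass 2: group maximal consecutive blocks of absent windows with two pointers.
--     out = []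
--     k, m = 0, len(labels)
--     while k < m:
--         if not labels[k][2]:
--             k += 1
--             continue
--         j = k + 1
--         while j < m and labels[j][2]:
--             j += 1
--         run = labels[k][1] + "".join(labels[t][1][-1] for t in range(k + 1, j))
--         out.append([run, labels[k][0]])
--         k = j
--     return out
-- ===== Notes on version B (the rewrite author's own statement) =====
-- stated objective: alternative
-- what changed: A's single incremental state machine (pending run string y, start index, flush-on-hit) is replaced by a two-pass decomposition: first label every kept window with an absent-from-unmutated flag, then group maximal consecutive absent blocks with a two-pointer scan over the label table.
import Mathlib
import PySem

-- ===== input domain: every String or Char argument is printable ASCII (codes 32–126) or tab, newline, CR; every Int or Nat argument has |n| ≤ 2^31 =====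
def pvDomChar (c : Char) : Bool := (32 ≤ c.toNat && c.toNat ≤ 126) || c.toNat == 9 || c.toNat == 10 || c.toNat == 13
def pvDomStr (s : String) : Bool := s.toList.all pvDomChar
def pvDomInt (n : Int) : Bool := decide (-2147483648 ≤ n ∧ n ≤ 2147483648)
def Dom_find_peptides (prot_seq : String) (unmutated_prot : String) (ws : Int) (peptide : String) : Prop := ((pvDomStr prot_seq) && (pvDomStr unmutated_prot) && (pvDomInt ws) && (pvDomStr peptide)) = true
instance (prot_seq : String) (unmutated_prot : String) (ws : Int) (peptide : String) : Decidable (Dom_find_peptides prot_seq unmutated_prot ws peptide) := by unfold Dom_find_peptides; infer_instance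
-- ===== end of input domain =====

-- B replaces A's incremental run state machine (pending string y / start / flush) by a
-- two-pass decomposition: label every kept window with its absence flag, then group maximal
-- consecutive absent blocks; same results, alternative structure (objective: alternative).

-- ===== PORT A =====
-- loop body of A's `for i in range(...)`: state = (y, start, return_l)
def pvStepA (s u p : List Char) (ws : Int)
    (st : List Char × Int × List (String × Int)) (i : Int) :
    List Char × Int × List (String × Int) :=
  let window := PySem.List.slice s (some i) (some (i + ws))
  if PySem.Chars.isIn window p = false ∧ p ≠ [] then st       -- continue
  else if PySem.Chars.find u window = -1 then
    if st.1 = [] then (window, i, st.2.2)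
    else
      -- y = y + window[-1]; window is nonempty whenever this line runs (find = -1 ⇒ window ≠ "")
      (st.1 ++ (PySem.List.pyGet? window (-1)).toList, st.2.1, st.2.2)
  else if st.1 ≠ [] then ([], st.2.1, st.2.2 ++ [(String.ofList st.1, st.2.1)])
  else st

-- the trailing `if y != "": return_l.append([y, start])`
def pvFinA (st : List Char × Int × List (String × Int)) : List (String × Int) :=
  if st.1 ≠ [] then st.2.2 ++ [(String.ofList st.1, st.2.1)] else st.2.2

def find_peptides (prot_seq : String) (unmutated_prot : String) (ws : Int) (peptide : String) : List (String × Int) :=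
  let s := prot_seq.toList
  pvFinA ((PySem.List.pyRange 0 ((s.length : Int) - ws + 1) 1).foldl
    (pvStepA s unmutated_prot.toList peptide.toList ws) ([], 0, []))

-- ===== PORT B =====
-- two-pointer grouping of Source B's while-loop: a True-flagged head starts a run, the inner
-- `while j < m and labels[j][2]` scan is the takeWhile/dropWhile of the tail
def pvGroupB : List (Int × List Char × Bool) → List (String × Int)
  | [] => []
  | t :: rest =>
    if t.2.2 then
      (String.ofList (t.2.1 ++ (rest.takeWhile (fun q => q.2.2)).flatMap
          (fun q => (PySem.List.pyGet? q.2.1 (-1)).toList)), t.1)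
        :: pvGroupB (rest.dropWhile (fun q => q.2.2))
    else pvGroupB rest
termination_by l => l.length
decreasing_by
  · exact Nat.lt_succ_of_le (List.length_dropWhile_le _ _)
  · exact Nat.lt_succ_of_le (Nat.le_refl _)

def find_peptides_alt (prot_seq : String) (unmutated_prot : String) (ws : Int) (peptide : String) : List (String × Int) :=
  let s := prot_seq.toList
  let u := unmutated_prot.toList
  let p := peptide.toList
  let kept := (PySem.List.pyRange 0 ((s.length : Int) - ws + 1) 1).filterMap (fun i =>
    let w := PySem.List.slice s (some i) (some (i + ws))
    if p = [] ∨ PySem.Chars.isIn w p = true then some (i, w) else none)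
  let labels := kept.map (fun iw => (iw.1, iw.2, PySem.Chars.find u iw.2 == (-1 : Int)))
  pvGroupB labels

-- ===== PRECONDITION & SPEC =====
def Spec_find_peptides (prot_seq : String) (unmutated_prot : String) (ws : Int) (peptide : String) (out : List (String × Int)) : Prop := out = find_peptides_alt prot_seq unmutated_prot ws peptide
instance (prot_seq : String) (unmutated_prot : String) (ws : Int) (peptide : String) (out : List (String × Int)) : Decidable (Spec_find_peptides prot_seq unmutated_prot ws peptide out) := by unfold Spec_find_peptides; infer_instance

-- ===== CLAIM (what is proved, stated in full; the proofs are below) =====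
def Claim_equal_find_peptides : Prop := ∀ (prot_seq : String) (unmutated_prot : String) (ws : Int) (peptide : String), Dom_find_peptides prot_seq unmutated_prot ws peptide → Spec_find_peptides prot_seq unmutated_prot ws peptide (find_peptides prot_seq unmutated_prot ws peptide)

-- ===== LEMMAS AND PROOFS =====

-- the label list B builds, as a function of the index list (proof-side helper)
def pvLabels (s u p : List Char) (ws : Int) (l : List Int) : List (Int × List Char × Bool) :=
  (l.filterMap (fun i =>
    let w := PySem.List.slice s (some i) (some (i + ws))
    if p = [] ∨ PySem.Chars.isIn w p = true then some (i, w) else none)).map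
    (fun iw => (iw.1, iw.2, PySem.Chars.find u iw.2 == (-1 : Int)))

-- B's value when a run with pending content y (started at `start`) is still open
def pvPend (y : List Char) (start : Int) (L : List (Int × List Char × Bool)) : List (String × Int) :=
  (String.ofList (y ++ (L.takeWhile (fun q => q.2.2)).flatMap
      (fun q => (PySem.List.pyGet? q.2.1 (-1)).toList)), start)
    :: pvGroupB (L.dropWhile (fun q => q.2.2))

lemma pvGroupB_cons_true (i : Int) (w : List Char) (L : List (Int × List Char × Bool)) :
    pvGroupB ((i, w, true) :: L) = pvPend w i L := by
  rw [pvGroupB]; simp [pvPend]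

lemma pvGroupB_cons_false (i : Int) (w : List Char) (L : List (Int × List Char × Bool)) :
    pvGroupB ((i, w, false) :: L) = pvGroupB L := by
  conv_lhs => rw [pvGroupB]
  simp

lemma pvPend_cons_true (y : List Char) (start i : Int) (w : List Char)
    (L : List (Int × List Char × Bool)) :
    pvPend y start ((i, w, true) :: L)
      = pvPend (y ++ (PySem.List.pyGet? w (-1)).toList) start L := by
  simp [pvPend]

lemma pvPend_cons_false (y : List Char) (start i : Int) (w : List Char)
    (L : List (Int × List Char × Bool)) :
    pvPend y start ((i, w, false) :: L) = (String.ofList y, start) :: pvGroupB L := by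
  simp [pvPend, pvGroupB_cons_false]

-- main invariant: finishing A's fold equals acc ++ B's grouping of the remaining labels,
-- with an open run pending exactly when y ≠ []
lemma pvFoldA_eq (s u p : List Char) (ws : Int) (l : List Int) :
    ∀ (y : List Char) (start : Int) (acc : List (String × Int)),
    pvFinA (l.foldl (pvStepA s u p ws) (y, start, acc)) =
      acc ++ (if y = [] then pvGroupB (pvLabels s u p ws l)
              else pvPend y start (pvLabels s u p ws l)) := by
  induction l with
  | nil =>
    intro y start acc
    by_cases hy : y = [] <;> simp [pvFinA, pvLabels, pvPend, pvGroupB, hy]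
  | cons i l ih =>
    intro y start acc
    simp only [List.foldl_cons]
    set w := PySem.List.slice s (some i) (some (i + ws)) with hw
    by_cases hskip : PySem.Chars.isIn w p = false ∧ p ≠ []
    · -- skipped window: not in labels, state unchanged
      have hlab : pvLabels s u p ws (i :: l) = pvLabels s u p ws l := by
        simp [pvLabels, ← hw, hskip.1, hskip.2]
      rw [hlab, ← ih y start acc]
      congr 1
      simp [pvStepA, ← hw, hskip]
    · -- kept window
      have hkeep : p = [] ∨ PySem.Chars.isIn w p = true := by
        rcases Bool.eq_false_or_eq_true (PySem.Chars.isIn w p) with h | h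
        · exact Or.inr h
        · by_cases hp : p = []
          · exact Or.inl hp
          · exact absurd ⟨h, hp⟩ hskip
      by_cases habs : PySem.Chars.find u w = -1
      · -- absent window: extends / starts a run
        have hwne : w ≠ [] := by
          intro h; rw [h, PySem.Chars.find_nil] at habs; exact absurd habs (by decide)
        have hlab : pvLabels s u p ws (i :: l) = (i, w, true) :: pvLabels s u p ws l := by
          simp [pvLabels, ← hw, hkeep, habs]
        rw [hlab]
        by_cases hy : y = []
        · have hstep : pvStepA s u p ws (y, start, acc) i = (w, i, acc) := by
            simp [pvStepA, ← hw, hskip, habs, hy]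
          rw [hstep, ih w i acc]
          simp [hy, hwne, pvGroupB_cons_true]
        · have hstep : pvStepA s u p ws (y, start, acc) i
              = (y ++ (PySem.List.pyGet? w (-1)).toList, start, acc) := by
            simp [pvStepA, ← hw, hskip, habs, hy]
          rw [hstep, ih (y ++ (PySem.List.pyGet? w (-1)).toList) start acc]
          simp [hy, pvPend_cons_true]
      · -- present window: closes any open run
        have hlab : pvLabels s u p ws (i :: l) = (i, w, false) :: pvLabels s u p ws l := by
          simp [pvLabels, ← hw, hkeep, habs]
        rw [hlab]
        by_cases hy : y = []
        · have hstep : pvStepA s u p ws (y, start, acc) i = (y, start, acc) := by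
            simp [pvStepA, ← hw, hskip, habs, hy]
          rw [hstep, ih y start acc]
          simp [hy, pvGroupB_cons_false]
        · have hstep : pvStepA s u p ws (y, start, acc) i
              = ([], start, acc ++ [(String.ofList y, start)]) := by
            simp [pvStepA, ← hw, hskip, habs, hy]
          rw [hstep, ih [] start (acc ++ [(String.ofList y, start)])]
          simp [hy, pvPend_cons_false]

lemma pvAlt_eq (prot_seq unmutated_prot : String) (ws : Int) (peptide : String) :
    find_peptides_alt prot_seq unmutated_prot ws peptide
      = pvGroupB (pvLabels prot_seq.toList unmutated_prot.toList peptide.toList ws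
          (PySem.List.pyRange 0 ((prot_seq.toList.length : Int) - ws + 1) 1)) := rfl

-- ===== VERDICT (by name: the statement is the Claim_ definition above) =====
theorem find_peptides_spec : Claim_equal_find_peptides := by
  intro prot_seq unmutated_prot ws peptide _
  unfold Spec_find_peptides find_peptides
  rw [pvAlt_eq, pvFoldA_eq]
  simp
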